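-- pv_equiv track=rewrite | github.com/rveeblefetzer/code-katas | string_pyramid.py | watch_pyramid_from_the_side
-- ===== SOURCE A (Python) =====
-- def watch_pyramid_from_the_side(characters):
--     """Build a pyramid with the given string, with the base as the first character,
--     and layering upwards and return the view from one side."""
--     if characters:
--         white_space = 0
--         count = len(characters)
--         result = ""
--         for char in characters:
--             result += " " * white_space + char * (2 * count - 1) +\
--                           " " * white_space + "\n"
--             count -= 1
--             white_space += 1
--         return result[-2::-1]
--     else:
--         return characters
-- ===== SOURCE B (Python) =====
-- def watch_pyramid_from_the_side(characters):
--     """Build the side-view rows directly (top row first), no front view + reversal."""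
--     if not characters:
--         return characters
--     n = len(characters)
--     rows = []
--     for j in range(n):
--         ws = n - 1 - j
--         rows.append(" " * ws + characters[ws] * (2 * j + 1) + " " * ws)
--     return "\n".join(rows)
-- ===== Notes on version B (the rewrite author's own statement) =====
-- stated objective: simpler
-- what changed: B builds the side-view rows directly (top row first, char taken at index n-1-j, width 2j+1) and joins them with newlines, instead of A's front-view string accumulation followed by the [-2::-1] slice-reversal of the whole string.
import Mathlib
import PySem

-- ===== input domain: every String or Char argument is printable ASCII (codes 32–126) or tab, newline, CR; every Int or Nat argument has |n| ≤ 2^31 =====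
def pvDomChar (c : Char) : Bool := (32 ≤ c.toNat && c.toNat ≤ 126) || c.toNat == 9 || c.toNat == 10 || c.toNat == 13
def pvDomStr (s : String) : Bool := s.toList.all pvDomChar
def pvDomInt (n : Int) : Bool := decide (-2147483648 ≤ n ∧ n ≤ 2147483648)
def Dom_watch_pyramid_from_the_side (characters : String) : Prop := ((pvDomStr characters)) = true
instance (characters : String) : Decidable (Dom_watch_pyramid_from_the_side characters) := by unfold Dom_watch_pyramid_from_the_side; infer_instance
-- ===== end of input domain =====

-- B builds the side-view rows directly (top first) and joins with '\n', instead of A's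
-- front-view accumulation + whole-string [-2::-1] slice-reversal; objective: simpler.

-- ===== PORT A =====
-- 'result[-2::-1]' is ported with PySem.List.slice?; the step is the literal -1 ≠ 0,
-- so slice? is always 'some' and '.getD []' never supplies the default.
def watch_pyramid_from_the_side (characters : String) : String :=
  if characters.toList ≠ [] then
    let cs := characters.toList
    let fin := cs.foldl
      (fun (st : Int × Int × List Char) c =>
        (st.1 + 1, st.2.1 - 1,
          st.2.2 ++ PySem.List.pyRepeat [' '] st.1
                ++ PySem.List.pyRepeat [c] (2 * st.2.1 - 1)
                ++ PySem.List.pyRepeat [' '] st.1 ++ ['\n']))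
      ((0 : Int), ((cs.length : Int), ([] : List Char)))
    String.ofList ((PySem.List.slice? fin.2.2 (some (-2)) none (-1)).getD [])
  else characters

-- ===== PORT B =====
-- 'characters[ws]' is always in range in Source B (ws = n-1-j with 0 ≤ j < n), so pyGetD is exact here.
def watch_pyramid_from_the_side_alt (characters : String) : String :=
  if characters.toList = [] then characters
  else
    let cs := characters.toList
    let n : Int := (cs.length : Int)
    let rows := (PySem.List.pyRange 0 n 1).map (fun j =>
      let ws := n - 1 - j
      PySem.List.pyRepeat [' '] ws
        ++ PySem.List.pyRepeat [PySem.List.pyGetD cs ws ' '] (2 * j + 1)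
        ++ PySem.List.pyRepeat [' '] ws)
    String.ofList (List.intercalate ['\n'] rows)

-- ===== PRECONDITION & SPEC =====
def Spec_watch_pyramid_from_the_side (characters : String) (out : String) : Prop := out = watch_pyramid_from_the_side_alt characters
instance (characters : String) (out : String) : Decidable (Spec_watch_pyramid_from_the_side characters out) := by unfold Spec_watch_pyramid_from_the_side; infer_instance

-- ===== CLAIM (what is proved, stated in full; the proofs are below) =====
def Claim_equal_watch_pyramid_from_the_side : Prop := ∀ (characters : String), Dom_watch_pyramid_from_the_side characters → Spec_watch_pyramid_from_the_side characters (watch_pyramid_from_the_side characters)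

-- ===== LEMMAS AND PROOFS =====

-- reading a list back out of itself index by index
theorem pvFilterMapIdx {α : Type} (ys : List α) :
    List.filterMap (fun x => ys[x]?) (List.range ys.length) = ys := by
  induction ys with
  | nil => rfl
  | cons y t ih =>
    rw [List.length_cons, List.range_succ_eq_map, List.filterMap_cons, List.filterMap_map]
    simp only [List.getElem?_cons_zero, List.getElem?_cons_succ, Function.comp]
    exact congrArg (y :: ·) ih

-- xs[-2::-1] is xs without its last element, reversed (for every xs, incl. length ≤ 1).
theorem pvSlice_neg_two_rev {α : Type} (xs : List α) :
    PySem.List.slice? xs (some (-2)) none (-1) = some xs.dropLast.reverse := by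
  simp only [PySem.List.slice?, PySem.List.sliceIndices]
  norm_num
  by_cases hn : xs.length ≤ 1
  · rw [if_neg (by omega)]
    have hd : xs.dropLast.length = 0 := by simp [List.length_dropLast]; omega
    simp [List.length_eq_zero_iff.mp hd]
  · rw [if_pos (by omega)]
    rw [max_eq_left (by omega : (-1 : Int) ≤ -2 + (xs.length : Int))]
    rw [show ((-2 : Int) + (xs.length : Int) + 1).toNat = xs.length - 1 by omega]
    rw [List.filterMap_congr (g := fun x => xs.dropLast.reverse[x]?) ?_]
    · rw [show xs.length - 1 = xs.dropLast.reverse.length by simp]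
      exact pvFilterMapIdx xs.dropLast.reverse
    · intro x hx
      have hx' : x < xs.length - 1 := List.mem_range.mp hx
      rw [show ((-2 : Int) + (xs.length : Int) + -(x : Int)).toNat = xs.length - 2 - x by omega]
      have h2 : xs.dropLast.reverse[x]? = some xs[xs.length - 2 - x] := by
        rw [List.getElem?_eq_getElem (by simp; omega)]
        congr 1
        rw [List.getElem_reverse, List.getElem_dropLast]
        congr 1
        simp only [List.length_dropLast]
        omega
      rw [List.getElem?_eq_getElem (by omega)]
      exact h2.symm

-- the rows A appends (without the trailing '\n'), as A's loop produces them
def pvARows (cs : List Char) (ws count : Int) : List (List Char) :=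
  match cs with
  | [] => []
  | c :: t =>
      (List.replicate ws.toNat ' ' ++ List.replicate (2 * count - 1).toNat c
        ++ List.replicate ws.toNat ' ') :: pvARows t (ws + 1) (count - 1)

theorem pvARows_length (cs : List Char) (ws count : Int) :
    (pvARows cs ws count).length = cs.length := by
  induction cs generalizing ws count with
  | nil => rfl
  | cons c t ih => simp [pvARows, ih]

-- A's foldl accumulates exactly the rows of pvARows, each followed by '\n'
theorem pvFold_eq (cs : List Char) : ∀ (ws count : Int) (acc : List Char),
    (cs.foldl
      (fun (st : Int × Int × List Char) c =>
        (st.1 + 1, st.2.1 - 1,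
          st.2.2 ++ PySem.List.pyRepeat [' '] st.1
                ++ PySem.List.pyRepeat [c] (2 * st.2.1 - 1)
                ++ PySem.List.pyRepeat [' '] st.1 ++ ['\n']))
      (ws, (count, acc))).2.2
    = acc ++ ((pvARows cs ws count).map (· ++ ['\n'])).flatten := by
  induction cs with
  | nil => intro ws count acc; simp [pvARows]
  | cons c t ih =>
    intro ws count acc
    simp only [List.foldl_cons]
    rw [ih]
    simp [pvARows, PySem.List.pyRepeat_singleton, List.append_assoc]

-- every row is a palindrome
theorem pvARows_palindrome (cs : List Char) (ws count : Int) :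
    (pvARows cs ws count).map List.reverse = pvARows cs ws count := by
  induction cs generalizing ws count with
  | nil => simp [pvARows]
  | cons c t ih => simp [pvARows, ih, List.reverse_append, List.append_assoc]

theorem pvIntercalate_concat {α : Type} (s x : List α) (l : List (List α)) (h : l ≠ []) :
    List.intercalate s (l ++ [x]) = List.intercalate s l ++ s ++ x := by
  have hcc : ∀ (y z : List α) (r : List (List α)),
      List.intercalate s (y :: z :: r) = y ++ s ++ List.intercalate s (z :: r) := by
    intro y z r
    simp [List.intercalate, List.intersperse, List.append_assoc]
  induction l with
  | nil => exact absurd rfl h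
  | cons a l ih =>
    cases l with
    | nil => simp [List.intercalate]
    | cons b t =>
      rw [show (a :: b :: t) ++ [x] = a :: ((b :: t) ++ [x]) by simp]
      rw [show (b :: t) ++ [x] = b :: (t ++ [x]) by simp, hcc]
      rw [show b :: (t ++ [x]) = (b :: t) ++ [x] from rfl, ih (by simp), hcc a b t]
      simp [List.append_assoc]

-- reversing the '\n'-terminated concatenation without its last char = joining reversed rows back-to-front
theorem pvRevJoin (bs : List (List Char)) (h : bs ≠ []) :
    ((bs.map (· ++ ['\n'])).flatten).dropLast.reverse
      = List.intercalate ['\n'] ((bs.map List.reverse).reverse) := by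
  induction bs with
  | nil => exact absurd rfl h
  | cons b t ih =>
    cases t with
    | nil => simp [List.intercalate]
    | cons b2 t2 =>
      have hne : ((b2 :: t2).map (· ++ ['\n'])).flatten ≠ [] := by simp
      simp only [List.map_cons, List.flatten_cons] at *
      rw [List.dropLast_append_of_ne_nil hne, List.reverse_append, ih (by simp)]
      rw [show (b.reverse :: b2.reverse :: List.map List.reverse t2).reverse
            = (b2.reverse :: List.map List.reverse t2).reverse ++ [b.reverse] by simp]
      rw [pvIntercalate_concat _ _ _ (by simp)]
      simp [List.reverse_append, List.append_assoc]


-- pvARows as a map over indices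
theorem pvARows_map (cs : List Char) : ∀ (ws count : Int),
    pvARows cs ws count = (List.range cs.length).map (fun (i : Nat) =>
      List.replicate (ws + (i : Int)).toNat ' '
        ++ List.replicate (2 * (count - (i : Int)) - 1).toNat (cs.getD i ' ')
        ++ List.replicate (ws + (i : Int)).toNat ' ') := by
  induction cs with
  | nil => intro ws count; simp [pvARows]
  | cons c t ih =>
    intro ws count
    simp only [pvARows, List.length_cons, List.range_succ_eq_map, List.map_cons, List.map_map]
    refine List.cons_eq_cons.mpr ⟨?_, ?_⟩
    · simp [List.getD]
    · rw [ih (ws + 1) (count - 1)]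
      apply List.map_congr_left
      intro i _
      have e1 : ws + 1 + (i : Int) = ws + ((i.succ : Nat) : Int) := by push_cast; ring
      have e2 : count - 1 - (i : Int) = count - ((i.succ : Nat) : Int) := by push_cast; ring
      simp [Function.comp, e1, e2, List.getD]

-- reversing a map over range
theorem pvRevMapRange {α : Type} (f : Nat → α) (n : Nat) :
    ((List.range n).map f).reverse = (List.range n).map (fun j => f (n - 1 - j)) := by
  apply List.ext_getElem
  · simp
  · intro i h1 h2
    simp [List.getElem_reverse]

-- ===== VERDICT (by name: the statement is the Claim_ definition above) =====
theorem watch_pyramid_from_the_side_spec : Claim_equal_watch_pyramid_from_the_side := by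
  intro s _
  unfold Spec_watch_pyramid_from_the_side
  by_cases h : s.toList = []
  · simp [watch_pyramid_from_the_side, watch_pyramid_from_the_side_alt, h]
  · have hne : pvARows s.toList 0 (s.toList.length : Int) ≠ [] := by
      intro hh
      have hl := pvARows_length s.toList 0 (s.toList.length : Int)
      rw [hh] at hl
      exact h (List.length_eq_zero_iff.mp hl.symm)
    simp only [watch_pyramid_from_the_side, watch_pyramid_from_the_side_alt, h, ne_eq,
      not_false_iff, if_true, if_false]
    rw [pvFold_eq s.toList 0 (s.toList.length : Int) [], List.nil_append]
    rw [pvSlice_neg_two_rev, Option.getD_some]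
    rw [pvRevJoin _ hne, pvARows_palindrome]
    congr 1
    rw [pvARows_map, pvRevMapRange]
    rw [PySem.List.pyRange_zero_natCast, List.map_map]
    refine congrArg _ (List.map_congr_left ?_)
    intro j hj
    have hj' : j < s.toList.length := List.mem_range.mp hj
    have e1 : ((0 : Int) + ((s.toList.length - 1 - j : Nat) : Int)).toNat
        = s.toList.length - 1 - j := by omega
    have e2 : (2 * ((s.toList.length : Int) - ((s.toList.length - 1 - j : Nat) : Int)) - 1).toNat
        = 2 * j + 1 := by omega
    have e3 : ((s.toList.length : Int) - 1 - (j : Int)) = ((s.toList.length - 1 - j : Nat) : Int) := by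
      omega
    have e4 : ((2 : Int) * (j : Int) + 1).toNat = 2 * j + 1 := by omega
    simp only [Function.comp_apply, PySem.List.pyRepeat_singleton]
    rw [e3, PySem.List.pyGetD_natCast, e1, e2, e4, Int.toNat_natCast]
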